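-- pv_equiv track=rewrite | github.com/tarneaux/songbook | convert.py | get_chords_in_line
-- ===== SOURCE A (Python) =====
-- def get_chords_in_line(chordline: str) -> list:
--     return list(zip(
--         [
--             chord
--             for chord in chordline.split(" ")
--             if chord != ""
--         ],
--         [
--             i
--             for i in range(len(chordline))
--             if chordline[i] != " " and (" "+chordline)[i] == " "
--         ]
--     ))
-- ===== SOURCE B (Python) =====
-- def get_chords_in_line(chordline: str) -> list:
--     # Single left-to-right scan: collect each maximal run of non-space
--     # characters together with its start index.
--     res = []
--     cur = ""
--     start = 0
--     for i, c in enumerate(chordline):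
--         if c == ' ':
--             if cur:
--                 res.append((cur, start))
--             cur = ""
--         else:
--             if not cur:
--                 start = i
--             cur += c
--     if cur:
--         res.append((cur, start))
--     return res
-- ===== Notes on version B (the rewrite author's own statement) =====
-- stated objective: faster
-- what changed: A builds two separate comprehensions (a filtered space-split for the tokens, and an index scan over the whole line that re-creates a shifted copy of the line at every index to detect run starts) and zips them; B makes one left-to-right scan that emits each token together with its start index as the run ends.
import Mathlib
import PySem

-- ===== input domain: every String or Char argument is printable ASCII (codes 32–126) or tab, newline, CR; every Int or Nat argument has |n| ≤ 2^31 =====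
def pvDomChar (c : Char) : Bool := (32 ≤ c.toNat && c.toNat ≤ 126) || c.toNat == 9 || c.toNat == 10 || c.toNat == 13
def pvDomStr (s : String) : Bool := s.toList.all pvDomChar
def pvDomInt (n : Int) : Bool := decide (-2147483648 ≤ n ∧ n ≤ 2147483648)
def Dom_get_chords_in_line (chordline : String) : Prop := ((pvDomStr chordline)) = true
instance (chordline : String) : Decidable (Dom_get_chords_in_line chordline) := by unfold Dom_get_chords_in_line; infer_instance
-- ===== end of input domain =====

-- B replaces A's zip of two full-string comprehensions (split + shifted-copy index scan, quadratic)
-- by a single left-to-right scan collecting each token with its start index (measured faster).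

-- ===== PORT A =====
def get_chords_in_line (chordline : String) : List (String × Int) :=
  List.zip
    (((PySem.Chars.splitOn chordline.toList [' ']).map String.ofList).filter
      (fun chord => chord ≠ ""))
    ((PySem.List.pyRange 0 (PySem.Str.len chordline) 1).filter
      (fun i => (PySem.List.pyGet? chordline.toList i != some ' ') &&
                (PySem.List.pyGet? (' ' :: chordline.toList) i == some ' ')))

-- ===== PORT B =====
def get_chords_in_line_alt (chordline : String) : List (String × Int) :=
  let fin := (PySem.List.enumerate chordline.toList).foldl
    (fun (st : List (String × Int) × List Char × Int) (p : Int × Char) =>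
      if p.2 = ' ' then
        ((if st.2.1 ≠ [] then st.1 ++ [(String.ofList st.2.1, st.2.2)] else st.1), [], st.2.2)
      else
        (st.1, st.2.1 ++ [p.2], if st.2.1 = [] then p.1 else st.2.2))
    ([], [], 0)
  if fin.2.1 ≠ [] then fin.1 ++ [(String.ofList fin.2.1, fin.2.2)] else fin.1

-- ===== PRECONDITION & SPEC =====
def Spec_get_chords_in_line (chordline : String) (out : List (String × Int)) : Prop := out = get_chords_in_line_alt chordline
instance (chordline : String) (out : List (String × Int)) : Decidable (Spec_get_chords_in_line chordline out) := by unfold Spec_get_chords_in_line; infer_instance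

-- ===== CLAIM (what is proved, stated in full; the proofs are below) =====
def Claim_equal_get_chords_in_line : Prop := ∀ (chordline : String), Dom_get_chords_in_line chordline → Spec_get_chords_in_line chordline (get_chords_in_line chordline)

-- ===== LEMMAS AND PROOFS =====

-- space-separated pieces of a char list (including empty pieces), structurally
def splitW : List Char → List (List Char)
  | [] => [[]]
  | c :: rest => if c = ' ' then [] :: splitW rest
                 else match splitW rest with
                      | [] => [[c]]
                      | t :: ts => (c :: t) :: ts

-- prepend to the head piece
def consH (p : List Char) : List (List Char) → List (List Char)
  | [] => [p]
  | t :: ts => (p ++ t) :: ts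

-- run-start offsets (Nat, relative); prev = "previous character is a separator"
def startsN : List Char → Bool → List Nat
  | [], _ => []
  | c :: rest, prev => (if c ≠ ' ' ∧ prev = true then [0] else []) ++ (startsN rest (c == ' ')).map Nat.succ

-- the runs (maximal non-space segments) with their start positions, scan-style
def runs : List Char → Int → List Char → Int → List (List Char × Int)
  | [], _, cur, start => if cur = [] then [] else [(cur, start)]
  | c :: rest, i, cur, start =>
      if c = ' ' then
        (if cur = [] then runs rest (i+1) [] start else (cur, start) :: runs rest (i+1) [] start)
      else runs rest (i+1) (cur ++ [c]) (if cur = [] then i else start)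

lemma splitW_ne_nil (s : List Char) : splitW s ≠ [] := by
  cases s with
  | nil => simp [splitW]
  | cons c rest =>
    simp only [splitW]
    split <;> [simp; (split <;> simp)]

lemma consH_nil (l : List (List Char)) (h : l ≠ []) : consH [] l = l := by
  cases l with
  | nil => exact absurd rfl h
  | cons t ts => simp [consH]

lemma consH_consH (a b : List Char) (l : List (List Char)) :
    consH a (consH b l) = consH (a ++ b) l := by
  cases l <;> simp [consH]

lemma splitW_cons_not_space (c : Char) (rest : List Char) (h : ¬ c = ' ') :
    splitW (c :: rest) = consH [c] (splitW rest) := by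
  simp only [splitW, if_neg h]
  cases hs : splitW rest with
  | nil => simp [consH]
  | cons t ts => simp [consH]

lemma go_spec (fuel : Nat) : ∀ (l cur : List Char) (acc : List (List Char)),
    l.length ≤ fuel →
    PySem.Chars.splitOn.go [' '] fuel l cur acc = acc.reverse ++ consH cur.reverse (splitW l) := by
  induction fuel with
  | zero =>
    intro l cur acc h
    have : l = [] := by cases l <;> simp_all
    subst this
    simp [PySem.Chars.splitOn.go, splitW, consH]
  | succ fuel ih =>
    intro l cur acc h
    cases l with
    | nil => simp [PySem.Chars.splitOn.go, splitW, consH]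
    | cons c rest =>
      by_cases hc : c = ' '
      · subst hc
        have hpre : [' '].isPrefixOf (' ' :: rest) = true := by simp [List.isPrefixOf]
        simp only [PySem.Chars.splitOn.go, hpre, List.length_singleton, List.drop_succ_cons,
          List.drop_zero, if_true]
        rw [ih rest [] (cur.reverse :: acc) (by simpa using Nat.le_of_succ_le_succ h)]
        rw [List.reverse_nil, consH_nil _ (splitW_ne_nil rest)]
        simp [splitW, consH]
      · have hpre : [' '].isPrefixOf (c :: rest) = false := by
          simp [List.isPrefixOf]; exact fun hh => hc hh.symm
        simp only [PySem.Chars.splitOn.go, hpre, Bool.false_eq_true, if_false]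
        rw [ih rest (c :: cur) acc (by simpa using Nat.le_of_succ_le_succ h)]
        rw [splitW_cons_not_space c rest hc]
        simp [consH_consH]

lemma splitOn_eq_splitW (s : List Char) :
    PySem.Chars.splitOn s [' '] = splitW s := by
  show PySem.Chars.splitOn.go [' '] (s.length + 1) s [] [] = splitW s
  rw [go_spec (s.length + 1) s [] [] (Nat.le_succ _)]
  simpa using consH_nil _ (splitW_ne_nil s)

-- A's token comprehension equals the nonempty pieces, which are the runs' first components
lemma tokens_eq (s : List Char) (i : Int) (cur : List Char) (start : Int) :
    (runs s i cur start).map Prod.fst = (consH cur (splitW s)).filter (· ≠ []) := by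
  induction s generalizing i cur start with
  | nil =>
    simp only [runs, splitW, consH]
    by_cases hc : cur = [] <;> simp [hc]
  | cons c rest ih =>
    by_cases hc : c = ' '
    · subst hc
      have hr := ih (i+1) [] start
      rw [consH_nil _ (splitW_ne_nil rest)] at hr
      by_cases hcur : cur = []
      · subst hcur
        simp [runs, splitW, hr, consH]
      · simp [runs, hcur, splitW, consH, hr]
    · simp only [runs, if_neg hc]
      rw [ih, splitW_cons_not_space c rest hc, consH_consH]

-- A's index comprehension (Nat side) equals startsN
lemma starts_filter_eq (s : List Char) (p : Char) :
    (List.range s.length).filter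
      (fun k => ((s[k]? != some ' ') && ((p :: s)[k]? == some ' '))) = startsN s (p == ' ') := by
  induction s generalizing p with
  | nil => simp [startsN]
  | cons c rest ih =>
    have hcomp : ((fun k => ((c :: rest)[k]? != some ' ' && (p :: c :: rest)[k]? == some ' ')) ∘ Nat.succ)
        = fun k => (rest[k]? != some ' ' && (c :: rest)[k]? == some ' ') := by
      funext k; simp
    have hhead : (((c :: rest)[0]? != some ' ') && ((p :: c :: rest)[0]? == some ' '))
        = decide (c ≠ ' ' ∧ (p == ' ') = true) := by
      by_cases hc : c = ' ' <;> by_cases hp : p = ' ' <;> simp [hc, hp]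
    rw [List.length_cons, List.range_succ_eq_map, List.filter_cons, List.filter_map, hcomp, ih c,
      hhead, startsN]
    by_cases hq : c = ' ' <;> by_cases hp : p = ' ' <;> simp [hq, hp]

-- the runs' second components are the startsN offsets shifted by i
lemma starts_runs_eq (s : List Char) (i : Int) (cur : List Char) (start : Int) :
    (runs s i cur start).map Prod.snd =
      (if cur = [] then [] else [start]) ++ (startsN s cur.isEmpty).map (fun k : Nat => (k : Int) + i) := by
  induction s generalizing i cur start with
  | nil =>
    by_cases hcur : cur = [] <;> simp [runs, startsN, hcur]
  | cons c rest ih =>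
    by_cases hc : c = ' '
    · subst hc
      by_cases hcur : cur = []
      · subst hcur
        rw [runs, if_pos rfl, if_pos rfl, ih, startsN]
        simp
        all_goals (intro a _; ring)
      · rw [runs, if_pos rfl, if_neg hcur, List.map_cons, ih, startsN]
        simp [hcur]
        all_goals (intro a _; ring)
    · have hb : (c == ' ') = false := by simp [hc]
      rw [runs, if_neg hc, ih, startsN, hb]
      by_cases hcur : cur = []
      · subst hcur
        simp [hc]
        all_goals (intro a _; ring)
      · have hie : (cur ++ [c]).isEmpty = false := by simp
        rw [hie]
        simp [hc, hcur]
        all_goals (intro a _; ring)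

-- B's fold equals runs
lemma fold_eq_runs (s : List Char) : ∀ (i : Int) (res : List (String × Int)) (cur : List Char) (start : Int),
    (let fin := (PySem.List.enumerate s i).foldl
        (fun (st : List (String × Int) × List Char × Int) (p : Int × Char) =>
          if p.2 = ' ' then
            ((if st.2.1 ≠ [] then st.1 ++ [(String.ofList st.2.1, st.2.2)] else st.1), [], st.2.2)
          else
            (st.1, st.2.1 ++ [p.2], if st.2.1 = [] then p.1 else st.2.2))
        (res, cur, start)
      if fin.2.1 ≠ [] then fin.1 ++ [(String.ofList fin.2.1, fin.2.2)] else fin.1) =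
    res ++ (runs s i cur start).map (fun r => (String.ofList r.1, r.2)) := by
  induction s with
  | nil =>
    intro i res cur start
    by_cases hcur : cur = [] <;>
      simp [PySem.List.enumerate, runs, hcur]
  | cons c rest ih =>
    intro i res cur start
    rw [PySem.List.enumerate_cons, List.foldl_cons]
    by_cases hc : c = ' '
    · subst hc
      by_cases hcur : cur = []
      · subst hcur
        simp only [ne_eq, not_true_eq_false, if_false, reduceIte]
        rw [ih (i+1) res [] start, runs, if_pos rfl, if_pos rfl]
      · simp only [reduceIte, ne_eq, hcur, not_false_eq_true, if_true]
        rw [ih (i+1) (res ++ [(String.ofList cur, start)]) [] start,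
          runs, if_pos rfl, if_neg hcur]
        simp
    · simp only [if_neg hc]
      rw [ih (i+1) res (cur ++ [c]) (if cur = [] then i else start), runs, if_neg hc]

-- ===== VERDICT (by name: the statement is the Claim_ definition above) =====
theorem get_chords_in_line_spec : Claim_equal_get_chords_in_line := by
  intro chordline _
  unfold Spec_get_chords_in_line get_chords_in_line get_chords_in_line_alt
  rw [fold_eq_runs chordline.toList 0 [] [] 0, List.nil_append]
  rw [splitOn_eq_splitW]
  -- tokens side
  have htok : ((splitW chordline.toList).map String.ofList).filter (fun chord => chord ≠ "")
      = (runs chordline.toList 0 [] 0).map (fun r => String.ofList r.1) := by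
    rw [List.filter_map]
    have : ((fun chord => decide (chord ≠ "")) ∘ String.ofList)
        = fun cs : List Char => decide (cs ≠ []) := by
      funext cs
      by_cases h : cs = []
      · subst h
        simp only [Function.comp]
        decide
      · have h2 : String.ofList cs ≠ "" := fun hh => h (by simpa using congrArg String.toList hh)
        simp [h, h2]
    rw [this, ← consH_nil _ (splitW_ne_nil chordline.toList), ← tokens_eq _ 0 [] 0, List.map_map]
    rfl
  -- starts side
  have hst : (PySem.List.pyRange 0 (PySem.Str.len chordline) 1).filter
      (fun i => (PySem.List.pyGet? chordline.toList i != some ' ') &&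
                (PySem.List.pyGet? (' ' :: chordline.toList) i == some ' '))
      = (runs chordline.toList 0 [] 0).map Prod.snd := by
    rw [PySem.Str.len_eq, PySem.List.pyRange_zero_natCast, List.filter_map]
    have : ((fun i => (PySem.List.pyGet? chordline.toList i != some ' ') &&
          (PySem.List.pyGet? (' ' :: chordline.toList) i == some ' ')) ∘ (fun k : Nat => (k : Int)))
        = fun k : Nat => ((chordline.toList[k]? != some ' ') && ((' ' :: chordline.toList)[k]? == some ' ')) := by
      funext k
      simp [PySem.List.pyGet?_natCast]
    rw [this, starts_filter_eq chordline.toList ' ', starts_runs_eq chordline.toList 0 [] 0]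
    simp
  rw [htok, hst, List.zip_map']
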